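-- pv_equiv track=rewrite | github.com/GundalaNikhil/DSA | dsa-problems/Bitwise/testcases/comprehensive_generator.py | sol_005
-- ===== SOURCE A (Python) =====
-- from typing import List, Tuple
--
-- def sol_005(a: List[int], s: int) -> int:
--     """BIT-005: Max Subarray XOR With Start"""
--     current_xor = 0
--     max_xor = 0
--     first = True
--     for i in range(s, len(a)):
--         current_xor ^= a[i]
--         if first:
--             max_xor = current_xor
--             first = False
--         else:
--             max_xor = max(max_xor, current_xor)
--     return max_xor
-- ===== SOURCE B (Python) =====
-- def sol_005(a, s):
--     """BIT-005: Max Subarray XOR With Start"""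
--     # Different algorithm: prefix_xor(s..i) == total_xor(a[s:]) ^ suffix_xor(a[i+1:]),
--     # so compute the total XOR in one forward pass, then scan BACKWARDS maintaining
--     # the suffix XOR and maximize total ^ suffix over all candidate endpoints.
--     tail = a[s:]
--     total = 0
--     for x in tail:
--         total ^= x
--     best = None
--     suf = 0
--     for x in reversed(tail):
--         c = total ^ suf
--         best = c if best is None else max(best, c)
--         suf ^= x
--     return 0 if best is None else best
-- ===== Notes on version B (the rewrite author's own statement) =====
-- stated objective: alternative
-- what changed: Instead of maximizing running prefix XORs in one fused forward loop, B uses the identity prefix_xor(s..i) = total_xor(a[s:]) ^ suffix_xor(a[i+1:]): it computes the total XOR forward, then walks the slice backwards maintaining a suffix XOR and maximizing total ^ suffix.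
-- outside the precondition, e.g. on sol_005([1, 2], -1): A returns 3, B returns 2; on sol_005([1, 2], -5): A raises IndexError, B returns 3
import Mathlib
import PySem

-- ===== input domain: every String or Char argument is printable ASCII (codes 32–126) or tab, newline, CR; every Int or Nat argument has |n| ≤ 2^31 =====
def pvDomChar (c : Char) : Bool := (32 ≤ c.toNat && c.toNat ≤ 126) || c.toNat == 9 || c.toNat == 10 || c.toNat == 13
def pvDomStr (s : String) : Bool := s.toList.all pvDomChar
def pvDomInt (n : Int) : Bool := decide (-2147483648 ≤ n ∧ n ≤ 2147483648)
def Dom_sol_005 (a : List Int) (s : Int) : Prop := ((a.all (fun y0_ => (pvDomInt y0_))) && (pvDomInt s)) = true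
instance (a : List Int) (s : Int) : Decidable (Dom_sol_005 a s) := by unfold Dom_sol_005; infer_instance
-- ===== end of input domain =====

-- B replaces the fused forward max-of-running-prefix loop by a different algorithm:
-- compute the total XOR of a[s:] forward, then scan BACKWARDS maintaining a suffix XOR,
-- maximizing total ^ suffix (prefix_xor(s..i) = total ^ suffix_xor(i+1..)).

-- ===== PORT A =====
-- state (current_xor, max_xor, first); pyGetD is exact on the in-range indices Pre_ admits
def sol_005 (a : List Int) (s : Int) : Int :=
  ((PySem.List.pyRange s a.length 1).foldl
    (fun (st : Int × Int × Bool) i =>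
      let c := PySem.Int.bxor st.1 (PySem.List.pyGetD a i 0)
      if st.2.2 then (c, c, false) else (c, max st.2.1 c, false))
    (0, 0, true)).2.1

-- ===== PORT B =====
-- 'best = c if best is None else max(best, c)' of Source B
def pvOmax (o : Option Int) (v : Int) : Option Int :=
  match o with
  | none => some v
  | some b => some (max b v)

-- body of Source B's reversed loop: state (best, suf)
def pvBStep (total : Int) (st : Option Int × Int) (x : Int) : Option Int × Int :=
  (pvOmax st.1 (PySem.Int.bxor total st.2), PySem.Int.bxor st.2 x)

def sol_005_alt (a : List Int) (s : Int) : Int :=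
  let tail := PySem.List.slice a (some s) none
  let total := tail.foldl (fun t x => PySem.Int.bxor t x) 0
  let r := tail.reverse.foldl (pvBStep total) (none, 0)
  match r.1 with
  | none => 0
  | some b => b

-- ===== PRECONDITION & SPEC =====
-- Pre_ excludes negative s, an unspecified corner: A's range walks negative indices with
-- Python wraparound (raising IndexError when s < -len(a)) while B's slice takes the plain
-- suffix; neither value is specified for a negative start index.
def Pre_sol_005 (a : List Int) (s : Int) : Prop := 0 ≤ s
instance (a : List Int) (s : Int) : Decidable (Pre_sol_005 a s) := by unfold Pre_sol_005; infer_instance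
def pvWitness_sol_005 : List Int × Int := ([1, 2, 3], 1)

def Spec_sol_005 (a : List Int) (s : Int) (out : Int) : Prop := out = sol_005_alt a s
instance (a : List Int) (s : Int) (out : Int) : Decidable (Spec_sol_005 a s out) := by unfold Spec_sol_005; infer_instance

-- ===== CLAIM (what is proved, stated in full; the proofs are below) =====
def Claim_equal_sol_005 : Prop := ∀ (a : List Int) (s : Int), Dom_sol_005 a s → Pre_sol_005 a s → Spec_sol_005 a s (sol_005 a s)

-- ===== LEMMAS AND PROOFS =====

-- sign/magnitude decomposition of PySem.Int.bxor, to get associativity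
def pvM (a : Int) : Nat := if 0 ≤ a then a.toNat else (-a-1).toNat
def pvS (a : Int) : Bool := decide (a < 0)

theorem pvBxor_eq (a b : Int) :
    PySem.Int.bxor a b = if (pvS a != pvS b) then -((pvM a ^^^ pvM b : Nat) : Int) - 1 else ((pvM a ^^^ pvM b : Nat) : Int) := by
  unfold PySem.Int.bxor pvM pvS
  split_ifs with h1 h2 h2 <;> simp_all <;> omega

theorem pvS_bxor (a b : Int) : pvS (PySem.Int.bxor a b) = (pvS a != pvS b) := by
  rw [pvBxor_eq]
  generalize (pvM a ^^^ pvM b : Nat) = n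
  split_ifs with h1
  · rw [h1]; simp [pvS]; omega
  · rw [Bool.not_eq_true] at h1; rw [h1]; simp [pvS]

theorem pvM_bxor (a b : Int) : pvM (PySem.Int.bxor a b) = pvM a ^^^ pvM b := by
  rw [pvBxor_eq]
  generalize (pvM a ^^^ pvM b : Nat) = n
  split_ifs with h1 <;> simp [pvM] <;> omega

theorem pvBxor_assoc (a b c : Int) :
    PySem.Int.bxor (PySem.Int.bxor a b) c = PySem.Int.bxor a (PySem.Int.bxor b c) := by
  rw [pvBxor_eq (PySem.Int.bxor a b) c, pvBxor_eq a (PySem.Int.bxor b c),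
      pvM_bxor, pvS_bxor, pvM_bxor, pvS_bxor, Nat.xor_assoc]
  cases pvS a <;> cases pvS b <;> cases pvS c <;> simp

theorem pvBxor_cancel (a b : Int) :
    PySem.Int.bxor (PySem.Int.bxor a b) b = a := by
  rw [pvBxor_assoc, PySem.Int.bxor_self, PySem.Int.bxor_zero]

-- running-XOR prefixes of l starting from accumulator c (the values A maximizes over)
def pvScan (c : Int) : List Int → List Int
  | [] => []
  | x :: xs => let c' := PySem.Int.bxor c x; c' :: pvScan c' xs

-- XOR of l accumulated back-to-front (the final value of Source B's suf)
def pvXr : List Int → Int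
  | [] => 0
  | x :: xs => PySem.Int.bxor (pvXr xs) x

-- ---- A's loop characterization (as in the fused loop) ----
theorem pvA_loop (l : List Int) (c m : Int) :
    (l.foldl (fun (st : Int × Int × Bool) x =>
        let c' := PySem.Int.bxor st.1 x
        if st.2.2 then (c', c', false) else (c', max st.2.1 c', false))
      (c, m, false)).2.1 = (pvScan c l).foldl max m := by
  induction l generalizing c m with
  | nil => simp [pvScan]
  | cons x xs ih => simp [List.foldl, pvScan, ih]

theorem pvMain (l : List Int) :
    (l.foldl (fun (st : Int × Int × Bool) x =>
        let c' := PySem.Int.bxor st.1 x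
        if st.2.2 then (c', c', false) else (c', max st.2.1 c', false))
      (0, 0, true)).2.1 =
    (match pvScan 0 l with
      | [] => (0 : Int)
      | h :: t => t.foldl max h) := by
  cases l with
  | nil => simp [pvScan]
  | cons x xs => simp [List.foldl, pvScan, pvA_loop]

-- ---- B's backward loop characterization ----
theorem pvB_foldr (t : Int) (l : List Int) :
    l.foldr (fun x st => pvBStep t st x) (none, 0) =
      ((pvScan (PySem.Int.bxor t (pvXr l)) l).reverse.foldl pvOmax none, pvXr l) := by
  induction l with
  | nil => simp [pvScan, pvXr]
  | cons x xs ih =>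
    have hc : PySem.Int.bxor (PySem.Int.bxor t (PySem.Int.bxor (pvXr xs) x)) x = PySem.Int.bxor t (pvXr xs) := by
      rw [← pvBxor_assoc, pvBxor_cancel]
    rw [List.foldr_cons, ih]
    simp only [pvBStep, pvScan, pvXr, List.reverse_cons, List.foldl_append, List.foldl_cons,
      List.foldl_nil, hc]

theorem pvOmax_comm (o : Option Int) (v w : Int) :
    pvOmax (pvOmax o v) w = pvOmax (pvOmax o w) v := by
  cases o with
  | none => simp [pvOmax, max_comm]
  | some b => simp only [pvOmax]; rw [max_right_comm]

theorem pvOmax_foldl_comm (l : List Int) (o : Option Int) (v : Int) :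
    l.foldl pvOmax (pvOmax o v) = pvOmax (l.foldl pvOmax o) v := by
  induction l generalizing o with
  | nil => rfl
  | cons x xs ih => rw [List.foldl_cons, List.foldl_cons, pvOmax_comm, ih]

theorem pvOmax_reverse (l : List Int) (o : Option Int) :
    l.reverse.foldl pvOmax o = l.foldl pvOmax o := by
  induction l generalizing o with
  | nil => rfl
  | cons x xs ih => simp [List.foldl, List.foldl_append, ih, pvOmax_foldl_comm]

theorem pvOmax_some (l : List Int) (h : Int) :
    l.foldl pvOmax (some h) = some (l.foldl max h) := by
  induction l generalizing h with
  | nil => rfl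
  | cons x xs ih => simp [List.foldl, pvOmax, ih]

theorem pvTotal (l : List Int) (c : Int) :
    l.foldl (fun t x => PySem.Int.bxor t x) c = PySem.Int.bxor c (pvXr l) := by
  induction l generalizing c with
  | nil => simp [pvXr, PySem.Int.bxor_zero]
  | cons x xs ih =>
    simp only [List.foldl, ih, pvXr, ← pvBxor_assoc]
    rw [pvBxor_assoc c x (pvXr xs), pvBxor_assoc c (pvXr xs) x,
      PySem.Int.bxor_comm x (pvXr xs)]

-- ===== VERDICT (by name: the statement is the Claim_ definition above) =====
theorem sol_005_spec : Claim_equal_sol_005 := by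
  intro a s _ hs
  unfold Spec_sol_005 sol_005 sol_005_alt
  rw [PySem.List.slice_from a hs]
  rw [PySem.List.foldl_pyRange_pyGetD' (xs := a) (a := s) (d := 0)
      (f := fun (st : Int × Int × Bool) x =>
        let c := PySem.Int.bxor st.1 x
        if st.2.2 then (c, c, false) else (c, max st.2.1 c, false)) (init := (0,0,true)) hs]
  set l := a.drop s.toNat with hl
  rw [pvMain]
  have htot : l.foldl (fun t x => PySem.Int.bxor t x) 0 = pvXr l := by
    rw [pvTotal, PySem.Int.bxor_comm, PySem.Int.bxor_zero]
  have hfr := pvB_foldr (pvXr l) l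
  rw [PySem.Int.bxor_self] at hfr
  simp only [htot, List.foldl_reverse, hfr]
  rw [← List.foldl_reverse, pvOmax_reverse]
  cases hsc : pvScan 0 l with
  | nil => rfl
  | cons h t =>
    rw [List.foldl_cons, show pvOmax none h = some h from rfl, pvOmax_some]
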